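-- pv_equiv track=rewrite | github.com/alexmuller/advent-of-code-2021 | day-03/lib/helpers.py | epsilon
-- ===== SOURCE A (Python) =====
-- import collections
--
-- def epsilon(input_list):
--     epsilon_list = []
--     num_bits = len(input_list[0])
--
--     for i in range(num_bits):
--         bits = [bit[i] for bit in input_list]
--
--         counter = collections.Counter(bits)
--
--         if counter['1'] < counter['0']:
--             epsilon_list.append('1')
--         else:
--             epsilon_list.append('0')
--
--     return ''.join(epsilon_list)
-- ===== SOURCE B (Python) =====
-- def epsilon(input_list):
--     num_bits = len(input_list[0])
--     ones = [0] * num_bits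
--     zeros = [0] * num_bits
--     for s in input_list:
--         ones = [ones[i] + (s[i] == '1') for i in range(num_bits)]
--         zeros = [zeros[i] + (s[i] == '0') for i in range(num_bits)]
--     return ''.join('1' if ones[i] < zeros[i] else '0' for i in range(num_bits))
-- ===== Notes on version B (the rewrite author's own statement) =====
-- stated objective: alternative
-- what changed: Row-major single pass accumulating per-position one/zero counts over the rows, then a final pass deciding each output bit, instead of rebuilding each column and a Counter per bit position.
import Mathlib
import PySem

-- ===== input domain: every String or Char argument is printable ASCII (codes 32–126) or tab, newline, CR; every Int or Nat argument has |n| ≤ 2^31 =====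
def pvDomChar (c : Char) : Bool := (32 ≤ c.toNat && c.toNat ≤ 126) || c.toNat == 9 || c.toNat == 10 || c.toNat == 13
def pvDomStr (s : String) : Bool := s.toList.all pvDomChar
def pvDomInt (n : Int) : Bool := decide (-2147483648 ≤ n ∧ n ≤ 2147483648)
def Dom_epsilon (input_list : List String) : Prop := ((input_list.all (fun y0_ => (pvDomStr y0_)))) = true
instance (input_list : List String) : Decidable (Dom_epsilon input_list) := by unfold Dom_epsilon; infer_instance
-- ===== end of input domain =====

-- B is a row-major accumulate-then-decide re-decomposition of A's column-major Counter loop.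

-- the i-th character of a row (total stand-in for Python's s[i]; Pre_ guarantees i is in range)
def pvCol (i : Nat) (s : String) : Char := (s.toList[i]?).getD ' '

-- ===== PORT A =====
def epsilon (input_list : List String) : String :=
  let num_bits := (input_list.headD "").toList.length
  let epsilon_list := (List.range num_bits).foldl (fun acc i =>
    let bits := input_list.map (pvCol i)
    -- collections.Counter(bits)['1'] / ['0'] = occurrence counts
    if bits.count '1' < bits.count '0' then acc ++ ['1'] else acc ++ ['0']) []
  String.ofList epsilon_list

-- ===== PORT B =====
def epsilon_alt (input_list : List String) : String :=
  let num_bits := (input_list.headD "").toList.length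
  let oz := input_list.foldl (fun (oz : List Nat × List Nat) s =>
      ((List.range num_bits).map (fun i => oz.1.getD i 0 + (if pvCol i s = '1' then 1 else 0)),
       (List.range num_bits).map (fun i => oz.2.getD i 0 + (if pvCol i s = '0' then 1 else 0))))
    (List.replicate num_bits 0, List.replicate num_bits 0)
  String.ofList ((List.range num_bits).map (fun i => if oz.1.getD i 0 < oz.2.getD i 0 then '1' else '0'))

-- ===== PRECONDITION & SPEC =====
-- Pre_ excludes exactly the inputs where the Python A raises IndexError: the empty list
-- (input_list[0]) and lists containing a row shorter than the first row (bit[i]).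
def Pre_epsilon (input_list : List String) : Prop :=
  input_list ≠ [] ∧ ∀ s ∈ input_list, (input_list.headD "").toList.length ≤ s.toList.length
instance (input_list : List String) : Decidable (Pre_epsilon input_list) := by unfold Pre_epsilon; infer_instance
def pvWitness_epsilon : List String := ["10", "01", "11"]
def Spec_epsilon (input_list : List String) (out : String) : Prop := out = epsilon_alt input_list
instance (input_list : List String) (out : String) : Decidable (Spec_epsilon input_list out) := by unfold Spec_epsilon; infer_instance

-- ===== CLAIM (what is proved, stated in full; the proofs are below) =====
def Claim_equal_epsilon : Prop := ∀ (input_list : List String), Dom_epsilon input_list → Pre_epsilon input_list → Spec_epsilon input_list (epsilon input_list)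

-- ===== LEMMAS AND PROOFS =====

theorem getD_map_range' {α : Type} (f : Nat → α) (n i : Nat) (d : α) (h : i < n) :
    ((List.range n).map f).getD i d = f i := by
  rw [List.getD_eq_getElem?_getD]
  simp [h]

-- invariant of B's fold: starting from pointwise tables A, B it ends at A/B plus the column counts
theorem alt_fold_inv (xs : List String) (n : Nat) (A B : Nat → Nat) :
    xs.foldl (fun (oz : List Nat × List Nat) s =>
      ((List.range n).map (fun i => oz.1.getD i 0 + (if pvCol i s = '1' then 1 else 0)),
       (List.range n).map (fun i => oz.2.getD i 0 + (if pvCol i s = '0' then 1 else 0))))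
      ((List.range n).map A, (List.range n).map B)
    = ((List.range n).map (fun i => A i + (xs.map (pvCol i)).count '1'),
       (List.range n).map (fun i => B i + (xs.map (pvCol i)).count '0')) := by
  induction xs generalizing A B with
  | nil => simp
  | cons s xs ih =>
      simp only [List.foldl_cons]
      have h1 : (List.range n).map (fun i =>
          (((List.range n).map A).getD i 0 + (if pvCol i s = '1' then 1 else 0)))
        = (List.range n).map (fun i => (A i + (if pvCol i s = '1' then 1 else 0))) := by
        apply List.map_congr_left; intro i hi
        rw [getD_map_range' A n i 0 (List.mem_range.mp hi)]
      have h2 : (List.range n).map (fun i =>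
          (((List.range n).map B).getD i 0 + (if pvCol i s = '0' then 1 else 0)))
        = (List.range n).map (fun i => (B i + (if pvCol i s = '0' then 1 else 0))) := by
        apply List.map_congr_left; intro i hi
        rw [getD_map_range' B n i 0 (List.mem_range.mp hi)]
      rw [h1, h2, ih]
      simp only [Prod.mk.injEq]
      constructor <;> (apply List.map_congr_left; intro i _; simp [List.count_cons]) <;> split <;> omega

theorem epsilon_eq (input_list : List String) : epsilon input_list = epsilon_alt input_list := by
  unfold epsilon epsilon_alt
  simp only []
  set n := (input_list.headD "").toList.length with hn
  have hrep : (List.replicate n (0:Nat), List.replicate n (0:Nat))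
      = ((List.range n).map (fun _ => 0), (List.range n).map (fun _ => 0)) := by
    simp [List.map_const']
  rw [hrep, alt_fold_inv input_list n (fun _ => 0) (fun _ => 0)]
  have hf : (fun (acc : List Char) i =>
      if (input_list.map (pvCol i)).count '1' < (input_list.map (pvCol i)).count '0'
      then acc ++ ['1'] else acc ++ ['0'])
    = fun acc i => acc ++ [if (input_list.map (pvCol i)).count '1' < (input_list.map (pvCol i)).count '0' then '1' else '0'] := by
    funext acc i; split <;> rfl
  rw [hf, PySem.List.foldl_append_singleton_eq_map]
  congr 1
  apply List.map_congr_left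
  intro i hi
  rw [getD_map_range' _ n i 0 (List.mem_range.mp hi),
      getD_map_range' _ n i 0 (List.mem_range.mp hi)]
  simp

-- ===== VERDICT (by name: the statement is the Claim_ definition above) =====
theorem epsilon_spec : Claim_equal_epsilon := by
  intro input_list _ _
  exact epsilon_eq input_list
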